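-- pv_equiv track=rewrite | github.com/kovidgoyal/calibre | src/calibre/ebooks/rtf2xml/fields_small.py | __index__format_func
-- ===== SOURCE A (Python) =====
-- def __index__format_func(my_string):
--     italics = 0
--     bold =0
--     lines = my_string.split('\n')
--     for line in lines:
--         token_info = line[:16]
--         if token_info == 'cw<in<index-bold':
--             bold = 1
--         if token_info == 'cw<in<index-ital':
--             italics = 1
--     return italics, bold
-- ===== SOURCE B (Python) =====
-- def __index__format_func(my_string):
--     italics = 1 if (my_string.startswith('cw<in<index-ital')
--                     or '\ncw<in<index-ital' in my_string) else 0
--     bold = 1 if (my_string.startswith('cw<in<index-bold')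
--                  or '\ncw<in<index-bold' in my_string) else 0
--     return italics, bold
-- ===== Notes on version B (the rewrite author's own statement) =====
-- stated objective: simpler
-- what changed: Replaced A's split-into-lines loop that slices line[:16] per line with two independent line-anchored whole-string substring tests (startswith(token), or newline-prefixed token as substring), eliminating the list-of-lines pass entirely.
import Mathlib
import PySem

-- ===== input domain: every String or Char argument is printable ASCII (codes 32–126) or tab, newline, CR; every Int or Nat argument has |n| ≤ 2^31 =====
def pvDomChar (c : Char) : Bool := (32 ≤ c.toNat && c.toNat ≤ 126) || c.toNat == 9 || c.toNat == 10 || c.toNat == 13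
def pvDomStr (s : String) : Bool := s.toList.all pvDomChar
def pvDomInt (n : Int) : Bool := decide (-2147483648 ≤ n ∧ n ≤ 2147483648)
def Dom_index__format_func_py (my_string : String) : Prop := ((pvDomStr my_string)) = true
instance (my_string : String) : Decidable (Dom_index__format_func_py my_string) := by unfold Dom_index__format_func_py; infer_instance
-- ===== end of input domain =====

-- B replaces A's per-line split-and-slice loop by two independent line-anchored
-- whole-string substring tests (startswith / '\n'+token in s); objective: simpler.


-- ===== PORT A =====
def index__format_func_py (my_string : String) : Int × Int :=
  let lines : List String := (PySem.Str.split? my_string "\n").getD []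
  lines.foldl
    (fun (st : Int × Int) (line : String) =>
      let token_info := PySem.Str.slice line none (some 16)
      let bold : Int := if token_info = "cw<in<index-bold" then 1 else st.2
      let italics : Int := if token_info = "cw<in<index-ital" then 1 else st.1
      (italics, bold))
    (0, 0)

-- ===== PORT B =====
def index__format_func_py_alt (my_string : String) : Int × Int :=
  let italics : Int :=
    if PySem.Str.startswith my_string "cw<in<index-ital"
        || PySem.Str.isIn "\ncw<in<index-ital" my_string then 1 else 0
  let bold : Int :=
    if PySem.Str.startswith my_string "cw<in<index-bold"
        || PySem.Str.isIn "\ncw<in<index-bold" my_string then 1 else 0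
  (italics, bold)

-- ===== PRECONDITION & SPEC =====
def Spec_index__format_func_py (my_string : String) (out : Int × Int) : Prop := out = index__format_func_py_alt my_string
instance (my_string : String) (out : Int × Int) : Decidable (Spec_index__format_func_py my_string out) := by unfold Spec_index__format_func_py; infer_instance

-- ===== CLAIM (what is proved, stated in full; the proofs are below) =====
def Claim_equal_index__format_func_py : Prop := ∀ (my_string : String), Dom_index__format_func_py my_string → Spec_index__format_func_py my_string (index__format_func_py my_string)

-- ===== LEMMAS AND PROOFS =====

-- structural form of splitting a char list at a separator character
def split1 (c : Char) (pre : List Char) : List Char → List (List Char)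
  | [] => [pre]
  | ch :: rest => if ch = c then pre :: split1 c [] rest else split1 c (pre ++ [ch]) rest

theorem go_spec (c : Char) (fuel : Nat) : ∀ (l cur : List Char) (acc : List (List Char)),
    l.length < fuel →
    PySem.Chars.splitOn.go [c] fuel l cur acc = acc.reverse ++ split1 c cur.reverse l := by
  induction fuel with
  | zero => intro l cur acc h; omega
  | succ n ih =>
    intro l cur acc h
    cases l with
    | nil => simp [PySem.Chars.splitOn.go, split1]
    | cons ch rest =>
      rw [PySem.Chars.splitOn.go]
      by_cases hc : ch = c
      · subst hc
        simp only [List.isPrefixOf, beq_self_eq_true, Bool.true_and, if_true]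
        rw [ih _ _ _ (by simpa using Nat.lt_of_succ_lt_succ h)]
        simp [split1]
      · have hpf : ([c].isPrefixOf (ch :: rest)) = false := by
          simp only [List.isPrefixOf, Bool.and_true, beq_eq_false_iff_ne]
          exact fun hcc => hc hcc.symm
        simp only [hpf, Bool.false_eq_true, if_false]
        rw [ih _ _ _ (by simp at h ⊢; omega)]
        simp [split1, hc]

theorem splitOn_eq (c : Char) (s : List Char) :
    PySem.Chars.splitOn s [c] = split1 c [] s := by
  unfold PySem.Chars.splitOn
  rw [go_spec c _ _ _ _ (by omega)]
  simp

theorem prefix_pre_of_cfree (c : Char) : ∀ (p pre t : List Char), c ∉ p → p <+: pre ++ c :: t → p <+: pre := by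
  intro p pre
  induction pre generalizing p with
  | nil =>
    intro t hc hp
    cases p with
    | nil => exact List.nil_prefix
    | cons b p' =>
      rw [List.nil_append, List.cons_prefix_cons] at hp
      exact absurd (hp.1 ▸ List.mem_cons_self) hc
  | cons a pre' ih =>
    intro t hc hp
    cases p with
    | nil => exact List.nil_prefix
    | cons b p' =>
      rw [List.cons_append, List.cons_prefix_cons] at hp
      rw [List.cons_prefix_cons]
      exact ⟨hp.1, ih p' t (fun h => hc (List.mem_cons_of_mem _ h)) hp.2⟩

-- a line of the split starts with a separator-free token p iff p is anchored in the whole string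
theorem key (c : Char) (p : List Char) (hc : c ∉ p) :
    ∀ (s pre : List Char), (∃ l ∈ split1 c pre s, p <+: l) ↔ (p <+: pre ++ s ∨ (c :: p) <:+: s) := by
  intro s
  induction s with
  | nil =>
    intro pre
    rw [split1, List.append_nil]
    constructor
    · rintro ⟨l, hl, hp⟩
      rw [List.mem_singleton] at hl
      exact Or.inl (hl ▸ hp)
    · rintro (h | h)
      · exact ⟨pre, List.mem_singleton.mpr rfl, h⟩
      · exact absurd (List.eq_nil_of_infix_nil h) (by simp)
  | cons ch rest ih =>
    intro pre
    by_cases h : ch = c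
    · subst h
      rw [split1, if_pos rfl]
      constructor
      · rintro ⟨l, hl, hpl⟩
        rcases List.mem_cons.mp hl with rfl | hl'
        · exact Or.inl (hpl.trans (List.prefix_append l (ch :: rest)))
        · rcases (ih []).mp ⟨l, hl', hpl⟩ with h1 | h1
          · rw [List.nil_append] at h1
            exact Or.inr ((List.infix_cons_iff).mpr (Or.inl (List.cons_prefix_cons.mpr ⟨rfl, h1⟩)))
          · exact Or.inr (h1.trans (List.infix_cons (List.infix_refl rest)))
      · rintro (hp | hinf)
        · exact ⟨pre, List.mem_cons_self, prefix_pre_of_cfree ch p pre rest hc hp⟩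
        · rcases List.infix_cons_iff.mp hinf with h1 | h1
          · rcases List.cons_prefix_cons.mp h1 with ⟨-, h2⟩
            obtain ⟨l, hl, hpl⟩ := (ih []).mpr (Or.inl (by simpa using h2))
            exact ⟨l, List.mem_cons_of_mem _ hl, hpl⟩
          · obtain ⟨l, hl, hpl⟩ := (ih []).mpr (Or.inr h1)
            exact ⟨l, List.mem_cons_of_mem _ hl, hpl⟩
    · rw [split1, if_neg h, ih (pre ++ [ch])]
      constructor
      · rintro (h1 | h1)
        · exact Or.inl (by simpa using h1)
        · exact Or.inr (h1.trans (List.infix_cons (List.infix_refl rest)))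
      · rintro (h1 | h1)
        · exact Or.inl (by simpa using h1)
        · rcases List.infix_cons_iff.mp h1 with h2 | h2
          · exact absurd (List.cons_prefix_cons.mp h2).1.symm h
          · exact Or.inr h2

-- line[:16] == tok  (for a 16-char tok)  is exactly "tok is a prefix of line"
theorem slice16_eq_iff (line tok : String) (h16 : tok.toList.length = 16) :
    PySem.Str.slice line none (some 16) = tok ↔ tok.toList <+: line.toList := by
  rw [← String.toList_inj, PySem.Str.toList_slice, PySem.Chars.slice_eq_listSlice,
      PySem.List.slice_to (xs := line.toList) (b := 16) (by norm_num)]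
  rw [List.prefix_iff_eq_take, h16]
  exact eq_comm

-- A's fold sets each flag iff some line passes the corresponding test
theorem fold_flags (L : List String) (i b : Int) :
    L.foldl
      (fun (st : Int × Int) (line : String) =>
        let token_info := PySem.Str.slice line none (some 16)
        let bold : Int := if token_info = "cw<in<index-bold" then 1 else st.2
        let italics : Int := if token_info = "cw<in<index-ital" then 1 else st.1
        (italics, bold))
      (i, b)
    = ((if L.any (fun line => PySem.Str.slice line none (some 16) == "cw<in<index-ital") then 1 else i),
       (if L.any (fun line => PySem.Str.slice line none (some 16) == "cw<in<index-bold") then 1 else b)) := by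
  induction L generalizing i b with
  | nil => simp
  | cons x L ih =>
    simp only [List.foldl_cons, List.any_cons, ih]
    by_cases hI : PySem.Str.slice x none (some 16) = "cw<in<index-ital" <;>
      by_cases hB : PySem.Str.slice x none (some 16) = "cw<in<index-bold" <;>
      simp [hI, hB]

-- the list of lines, on the char level
theorem lines_toList (s : String) :
    ∃ L : List String, PySem.Str.split? s "\n" = some L ∧
      L.map String.toList = split1 '\n' [] s.toList := by
  have h1 := PySem.Str.split?_map s "\n"
  rw [show ("\n" : String).toList = ['\n'] from rfl] at h1
  rw [PySem.Chars.split?] at h1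
  simp only [List.isEmpty_cons, Bool.false_eq_true, if_false] at h1
  obtain ⟨L, hL, hLm⟩ := Option.map_eq_some_iff.mp h1
  exact ⟨L, hL, by rw [hLm, splitOn_eq]⟩

theorem any_flag (s : String) (L : List String)
    (hLm : L.map String.toList = split1 '\n' [] s.toList)
    (tok : String) (h16 : tok.toList.length = 16) (hnl : '\n' ∉ tok.toList) :
    (L.any (fun line => PySem.Str.slice line none (some 16) == tok))
      = (PySem.Str.startswith s tok || PySem.Str.isIn ("\n" ++ tok) s) := by
  rw [Bool.eq_iff_iff, List.any_eq_true, Bool.or_eq_true,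
      PySem.Str.startswith_eq, PySem.Chars.startswith_iff, PySem.Str.isIn_iff_infix,
      String.toList_append, show ("\n" : String).toList = ['\n'] from rfl, List.singleton_append]
  constructor
  · rintro ⟨line, hline, hp⟩
    rw [beq_iff_eq, slice16_eq_iff line tok h16] at hp
    have : ∃ l ∈ split1 '\n' [] s.toList, tok.toList <+: l := by
      refine ⟨line.toList, ?_, hp⟩
      rw [← hLm]; exact List.mem_map_of_mem hline
    simpa using (key '\n' tok.toList hnl s.toList []).mp this
  · intro h
    have := (key '\n' tok.toList hnl s.toList []).mpr (by simpa using h)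
    obtain ⟨l, hl, hpl⟩ := this
    rw [← hLm] at hl
    obtain ⟨line, hline, rfl⟩ := List.mem_map.mp hl
    exact ⟨line, hline, by rw [beq_iff_eq, slice16_eq_iff line tok h16]; exact hpl⟩

theorem main_eq (s : String) : index__format_func_py s = index__format_func_py_alt s := by
  obtain ⟨L, hL, hLm⟩ := lines_toList s
  unfold index__format_func_py index__format_func_py_alt
  rw [hL]
  simp only [Option.getD_some]
  rw [fold_flags L 0 0,
      any_flag s L hLm "cw<in<index-ital" (by decide) (by decide),
      any_flag s L hLm "cw<in<index-bold" (by decide) (by decide),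
      show ("\n" ++ "cw<in<index-ital" : String) = "\ncw<in<index-ital" by decide,
      show ("\n" ++ "cw<in<index-bold" : String) = "\ncw<in<index-bold" by decide]

-- ===== VERDICT (by name: the statement is the Claim_ definition above) =====
theorem index__format_func_py_spec : Claim_equal_index__format_func_py := by
  intro s _
  show index__format_func_py s = index__format_func_py_alt s
  exact main_eq s
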